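-- pv_equiv track=rewrite | github.com/ishangote/Coding-Interviews-Python | Leetcode/2222 Number of Ways to Select Buildings/ways_to_select_buildings.py | helper
-- ===== SOURCE A (Python) =====
-- def helper(input_string, direction, bit):
--     res = [0] * len(input_string)
--     count = 0
--
--     start, end, step = (
--         (0, len(input_string), 1)
--         if direction == "LEFT"
--         else (len(input_string) - 1, -1, -1)
--     )
--
--     for idx in range(start, end, step):
--         if input_string[idx] == bit:
--             count += 1
--         else:
--             res[idx] = count
--
--     return res
-- ===== SOURCE B (Python) =====
-- def helper(input_string, direction, bit):
--     # Single forward pass for both directions: at a non-bit position the answer is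
--     # the number of bit-chars seen so far (LEFT) or total minus that (RIGHT).
--     matches = [1 if ch == bit else 0 for ch in input_string]
--     total = sum(matches)
--     out = []
--     seen = 0
--     for m in matches:
--         if m:
--             out.append(0)
--             seen += 1
--         else:
--             out.append(seen if direction == "LEFT" else total - seen)
--     return out
-- ===== Notes on version B (the rewrite author's own statement) =====
-- stated objective: alternative
-- what changed: B replaces A's direction-dependent traversal (forward for LEFT, index-descending for RIGHT) with a single forward pass over a precomputed 0/1 match list, deriving the RIGHT answer arithmetically as total-minus-seen instead of scanning backward and writing into a preallocated array by index.
import Mathlib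
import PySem

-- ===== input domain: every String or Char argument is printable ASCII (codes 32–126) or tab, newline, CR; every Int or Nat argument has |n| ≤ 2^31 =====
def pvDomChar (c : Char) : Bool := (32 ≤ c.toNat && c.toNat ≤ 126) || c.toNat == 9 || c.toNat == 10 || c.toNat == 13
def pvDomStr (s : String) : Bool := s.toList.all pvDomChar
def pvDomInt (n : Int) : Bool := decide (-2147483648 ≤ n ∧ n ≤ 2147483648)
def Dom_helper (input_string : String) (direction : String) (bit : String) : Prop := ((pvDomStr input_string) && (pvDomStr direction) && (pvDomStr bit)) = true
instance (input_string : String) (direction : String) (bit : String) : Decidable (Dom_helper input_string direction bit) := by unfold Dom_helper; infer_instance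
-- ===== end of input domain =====

-- B replaces A's direction-dependent traversal with one forward pass (total-minus-seen for RIGHT); objective: alternative, same O(n) cost.

-- ===== PORT A =====
-- loop body of A's for-loop ('if input_string[idx] == bit: count += 1 else: res[idx] = count')
def helperStep (s : List Char) (bit : String) (st : List Int × Int) (idx : Int) : List Int × Int :=
  if String.mk [(PySem.List.pyGet? s idx).getD ' '] == bit then (st.1, st.2 + 1)
  else (st.1.set idx.toNat st.2, st.2)

def helper (input_string : String) (direction : String) (bit : String) : List Int :=
  let s := input_string.toList
  let sse : Int × Int × Int :=
    if direction == "LEFT" then ((0 : Int), (s.length : Int), 1)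
    else ((s.length : Int) - 1, -1, -1)
  ((PySem.List.pyRange sse.1 sse.2.1 sse.2.2).foldl (helperStep s bit) (List.replicate s.length 0, 0)).1

-- ===== PORT B =====
-- loop body of B's for-loop ('if m: out.append(0); seen += 1 else: out.append(seen if direction == "LEFT" else total - seen)')
def altStep (direction : String) (total : Int) (st : List Int × Int) (m : Int) : List Int × Int :=
  if m != 0 then (st.1 ++ [(0 : Int)], st.2 + 1)
  else (st.1 ++ [if direction == "LEFT" then st.2 else total - st.2], st.2)

def helper_alt (input_string : String) (direction : String) (bit : String) : List Int :=
  let ms := input_string.toList.map (fun ch => if String.mk [ch] == bit then (1 : Int) else 0)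
  let total := ms.sum
  (ms.foldl (altStep direction total) ([], 0)).1

-- ===== PRECONDITION & SPEC =====
def Spec_helper (input_string : String) (direction : String) (bit : String) (out : List Int) : Prop := out = helper_alt input_string direction bit
instance (input_string : String) (direction : String) (bit : String) (out : List Int) : Decidable (Spec_helper input_string direction bit out) := by unfold Spec_helper; infer_instance

-- ===== CLAIM (what is proved, stated in full; the proofs are below) =====
def Claim_equal_helper : Prop := ∀ (input_string : String) (direction : String) (bit : String), Dom_helper input_string direction bit → Spec_helper input_string direction bit (helper input_string direction bit)

-- ===== LEMMAS AND PROOFS =====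

-- the common value both loops compute: 0 at bit positions, else f of the running left-match count
def buildF (p : Char → Bool) (f : Int → Int) : Int → List Char → List Int
  | _, [] => []
  | a, c :: t => if p c then 0 :: buildF p f (a + 1) t else f a :: buildF p f a t
def cntI (p : Char → Bool) (s : List Char) : Int := (s.countP p : Int)
lemma cntI_nil (p : Char → Bool) : cntI p [] = 0 := rfl
lemma cntI_cons (p : Char → Bool) (c : Char) (t : List Char) :
    cntI p (c :: t) = (if p c then 1 else 0) + cntI p t := by
  by_cases hc : p c <;> simp [cntI, List.countP_cons, hc] <;> push_cast <;> ring
lemma cntI_append_singleton (p : Char → Bool) (u : List Char) (c : Char) :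
    cntI p (u ++ [c]) = cntI p u + (if p c then 1 else 0) := by
  by_cases hc : p c <;> simp [cntI, List.countP_append, hc]

lemma buildF_append_singleton (p : Char → Bool) (f : Int → Int) (u : List Char) (c : Char) :
    ∀ (a : Int), buildF p f a (u ++ [c]) = buildF p f a u ++ [if p c then 0 else f (a + cntI p u)] := by
  induction u with
  | nil => intro a; by_cases hc : p c <;> simp [buildF, hc, cntI_nil]
  | cons d u' ih =>
    intro a
    by_cases hd : p d <;> by_cases hc : p c <;>
      simp [buildF, hd, hc, ih, cntI_cons] <;> ring_nf
lemma alt_fold (d bitS : String) (total : Int) :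
    ∀ (s : List Char) (out : List Int) (a : Int),
    (s.map (fun ch => if String.mk [ch] == bitS then (1 : Int) else 0)).foldl (altStep d total) (out, a)
    = (out ++ buildF (fun c => String.mk [c] == bitS) (fun x => if d == "LEFT" then x else total - x) a s,
       a + cntI (fun c => String.mk [c] == bitS) s) := by
  intro s
  induction s with
  | nil => intro out a; simp [buildF, cntI_nil]
  | cons c t ih =>
    intro out a
    by_cases hc : (String.mk [c] == bitS) = true
    · simp only [List.map_cons, List.foldl_cons, if_pos hc]
      rw [show altStep d total (out, a) 1 = (out ++ [0], a + 1) by simp [altStep]]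
      rw [ih]
      simp [buildF, hc, cntI_cons]
      ring
    · simp only [List.map_cons, List.foldl_cons, if_neg hc]
      rw [show altStep d total (out, a) 0
            = (out ++ [if d == "LEFT" then a else total - a], a) by simp [altStep]]
      rw [ih]
      simp [buildF, hc, cntI_cons]
lemma helper_fold_left (bitS : String) (s : List Char) :
    ∀ (t pre : List Char), s = pre ++ t →
    ∀ (rpre : List Int) (a : Int), rpre.length = pre.length →
    (PySem.List.pyRange (pre.length : Int) (s.length : Int) 1).foldl (helperStep s bitS) (rpre ++ List.replicate t.length 0, a)
    = (rpre ++ buildF (fun c => String.mk [c] == bitS) (fun x => x) a t,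
       a + cntI (fun c => String.mk [c] == bitS) t) := by
  intro t
  induction t with
  | nil =>
    intro pre hs rpre a hlen
    have : (pre.length : Int) = (s.length : Int) := by subst hs; simp
    rw [this, PySem.List.pyRange_one_eq_nil le_rfl]
    simp [buildF, cntI_nil]
  | cons c t' ih =>
    intro pre hs rpre a hlen
    have hlt : (pre.length : Int) < (s.length : Int) := by subst hs; simp
    have hget' : s[pre.length]? = some c := by subst hs; simp
    have hstep : ∀ (st : List Int × Int), helperStep s bitS st (pre.length : Int)
        = if String.mk [c] == bitS then (st.1, st.2 + 1) else (st.1.set pre.length st.2, st.2) := by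
      intro st; simp [helperStep, hget']
    rw [PySem.List.pyRange_one_cons hlt, List.foldl_cons, hstep]
    by_cases hc : (String.mk [c] == bitS) = true
    · rw [if_pos hc]
      have ih' := ih (pre ++ [c]) (by rw [hs, List.append_assoc]; rfl) (rpre ++ [0]) (a + 1) (by simp [hlen])
      simp only [List.length_append, List.length_singleton, Nat.cast_add, Nat.cast_one] at ih'
      rw [show ((rpre ++ List.replicate (c :: t').length (0:Int), a).1, (rpre ++ List.replicate (c :: t').length (0:Int), a).2 + 1)
          = ((rpre ++ [0]) ++ List.replicate t'.length 0, a + 1) by simp [List.replicate_succ]]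
      rw [ih']
      simp [buildF, hc, cntI_cons]
      ring
    · rw [if_neg hc]
      have ih' := ih (pre ++ [c]) (by rw [hs, List.append_assoc]; rfl) (rpre ++ [a]) a (by simp [hlen])
      simp only [List.length_append, List.length_singleton, Nat.cast_add, Nat.cast_one] at ih'
      rw [show ((rpre ++ List.replicate (c :: t').length (0:Int), a).1.set pre.length (rpre ++ List.replicate (c :: t').length (0:Int), a).2, (rpre ++ List.replicate (c :: t').length (0:Int), a).2)
          = ((rpre ++ [a]) ++ List.replicate t'.length 0, a) by rw [← hlen]; simp [List.replicate_succ]]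
      rw [ih']
      simp [buildF, hc, cntI_cons]
lemma helper_fold_right (bitS : String) (s : List Char) :
    ∀ (pre rest : List Char), s = pre ++ rest →
    ∀ (suf : List Int) (a : Int),
    (PySem.List.pyRange ((pre.length : Int) - 1) (-1) (-1)).foldl (helperStep s bitS) (List.replicate pre.length 0 ++ suf, a)
    = (buildF (fun c => String.mk [c] == bitS) (fun x => a + cntI (fun c => String.mk [c] == bitS) pre - x) 0 pre ++ suf,
       a + cntI (fun c => String.mk [c] == bitS) pre) := by
  intro pre
  induction pre using List.reverseRecOn with
  | nil =>
    intro rest hs suf a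
    rw [show ((([] : List Char).length : Int) - 1) = -1 by simp]
    rw [PySem.List.pyRange_neg_one_eq_nil le_rfl]
    simp [buildF, cntI_nil]
  | append_singleton u c ih =>
    intro rest hs suf a
    have hs' : s = u ++ (c :: rest) := by rw [hs]; simp
    have hstart : ((u ++ [c]).length : Int) - 1 = (u.length : Int) := by simp
    rw [hstart, PySem.List.pyRange_neg_one_cons (by omega), List.foldl_cons]
    have hget' : s[u.length]? = some c := by subst hs'; simp
    have hstep : ∀ (st : List Int × Int), helperStep s bitS st (u.length : Int)
        = if String.mk [c] == bitS then (st.1, st.2 + 1) else (st.1.set u.length st.2, st.2) := by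
      intro st; simp [helperStep, hget']
    rw [hstep]
    by_cases hc : (String.mk [c] == bitS) = true
    · rw [if_pos hc]
      rw [show ((List.replicate (u ++ [c]).length (0:Int) ++ suf, a).1, (List.replicate (u ++ [c]).length (0:Int) ++ suf, a).2 + 1)
          = (List.replicate u.length 0 ++ ((0:Int) :: suf), a + 1) by simp [List.replicate_succ']]
      rw [ih (c :: rest) hs' ((0:Int) :: suf) (a + 1)]
      have hcnt : cntI (fun c => String.mk [c] == bitS) (u ++ [c]) = cntI (fun c => String.mk [c] == bitS) u + 1 := by
        simp [cntI_append_singleton, hc]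
      have hf : (fun x => a + cntI (fun c => String.mk [c] == bitS) (u ++ [c]) - x)
          = (fun x => (a + 1) + cntI (fun c => String.mk [c] == bitS) u - x) := by
        funext x; rw [hcnt]; ring
      rw [hf, buildF_append_singleton, hcnt]
      simp [hc]
      ring
    · rw [if_neg hc]
      rw [show ((List.replicate (u ++ [c]).length (0:Int) ++ suf, a).1.set u.length (List.replicate (u ++ [c]).length (0:Int) ++ suf, a).2, (List.replicate (u ++ [c]).length (0:Int) ++ suf, a).2)
          = (List.replicate u.length 0 ++ ((a:Int) :: suf), a) by simp [List.replicate_succ']]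
      rw [ih (c :: rest) hs' ((a:Int) :: suf) a]
      have hcnt : cntI (fun c => String.mk [c] == bitS) (u ++ [c]) = cntI (fun c => String.mk [c] == bitS) u := by
        simp [cntI_append_singleton, hc]
      have hf : (fun x => a + cntI (fun c => String.mk [c] == bitS) (u ++ [c]) - x)
          = (fun x => a + cntI (fun c => String.mk [c] == bitS) u - x) := by
        funext x; rw [hcnt]
      rw [hf, buildF_append_singleton, hcnt]
      simp [hc]

lemma sum_matches (bitS : String) (s : List Char) :
    (s.map (fun ch => if String.mk [ch] == bitS then (1 : Int) else 0)).sum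
    = cntI (fun c => String.mk [c] == bitS) s := by
  exact PySem.List.sum_map_ite_one_zero (fun x => String.mk [x] == bitS) s

-- ===== VERDICT (by name: the statement is the Claim_ definition above) =====
theorem helper_spec : Claim_equal_helper := by
  intro input_string direction bit _
  unfold Spec_helper helper helper_alt
  by_cases hd : (direction == "LEFT") = true
  · simp only [hd, if_true]
    rw [alt_fold direction bit _ input_string.toList [] 0]
    have hl := helper_fold_left bit input_string.toList input_string.toList [] rfl [] 0 rfl
    simp only [List.length_nil, Nat.cast_zero, List.nil_append, zero_add] at hl
    rw [hl]
    simp [hd]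
  · simp only [hd, Bool.false_eq_true, if_false]
    rw [alt_fold direction bit _ input_string.toList [] 0]
    have hr := helper_fold_right bit input_string.toList input_string.toList [] (by simp) [] 0
    simp only [List.append_nil, zero_add] at hr
    rw [hr]
    rw [sum_matches]
    simp [hd]
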